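-- pv_equiv track=rewrite | github.com/QuanDo2000/programming-exercises | temp/temp.py | check
-- ===== SOURCE A (Python) =====
-- def check(perm):
--     flag = True
--     for i in range(len(perm)):
--         if i > 0 and i < len(perm) - 1:
--             if perm[i] >= max(perm[:i]) and perm[i] <= min(perm[i + 1:]):
--                 flag = False
--         elif i == 0:
--             if perm[i] <= min(perm[i + 1:]):
--                 flag = False
--         elif i == len(perm) - 1:
--             if perm[i] >= max(perm[:i]):
--                 flag = False
--     return flag
-- ===== SOURCE B (Python) =====
-- def check(perm):
--     n = len(perm)
--     suffmin = perm[:]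
--     for i in range(n - 2, -1, -1):
--         if suffmin[i + 1] < suffmin[i]:
--             suffmin[i] = suffmin[i + 1]
--     premax = perm[:]
--     for i in range(1, n):
--         if premax[i - 1] > premax[i]:
--             premax[i] = premax[i - 1]
--     return not any(
--         (i == 0 or perm[i] >= premax[i - 1])
--         and (i == n - 1 or perm[i] <= suffmin[i + 1])
--         for i in range(n)
--     )
-- ===== Notes on version B (the rewrite author's own statement) =====
-- stated objective: faster
-- what changed: Replaced the per-index max(perm[:i])/min(perm[i+1:]) rescans with precomputed prefix-max and suffix-min arrays and a single any() pass.
import Mathlib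
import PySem

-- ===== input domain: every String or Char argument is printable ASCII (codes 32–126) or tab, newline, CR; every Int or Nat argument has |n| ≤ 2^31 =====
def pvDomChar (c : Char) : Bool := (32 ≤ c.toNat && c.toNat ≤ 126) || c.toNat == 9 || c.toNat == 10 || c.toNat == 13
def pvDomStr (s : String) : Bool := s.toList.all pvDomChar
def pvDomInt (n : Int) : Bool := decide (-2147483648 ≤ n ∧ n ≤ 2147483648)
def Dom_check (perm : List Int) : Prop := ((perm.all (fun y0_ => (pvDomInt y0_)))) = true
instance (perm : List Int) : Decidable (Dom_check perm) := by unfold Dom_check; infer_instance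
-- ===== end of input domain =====

-- B replaces A's quadratic per-index max/min rescans by prefix-max and suffix-min arrays and one pass (objective: faster).

-- ===== PORT A =====
def check (perm : List Int) : Bool :=
  (PySem.List.pyRange 0 (perm.length : Int) 1).foldl (fun flag i =>
    if 0 < i ∧ i < (perm.length : Int) - 1 then
      if PySem.List.pyGetD perm i 0 ≥ (PySem.List.max? (PySem.List.slice perm none (some i)) (fun y => y)).getD 0
         ∧ PySem.List.pyGetD perm i 0 ≤ (PySem.List.min? (PySem.List.slice perm (some (i + 1)) none) (fun y => y)).getD 0
      then false else flag
    else if i = 0 then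
      if PySem.List.pyGetD perm i 0 ≤ (PySem.List.min? (PySem.List.slice perm (some (i + 1)) none) (fun y => y)).getD 0
      then false else flag
    else if i = (perm.length : Int) - 1 then
      if PySem.List.pyGetD perm i 0 ≥ (PySem.List.max? (PySem.List.slice perm none (some i)) (fun y => y)).getD 0
      then false else flag
    else flag) true

-- ===== PORT B =====
-- backward loop writing suffmin[i] = (suffmin[i+1] if suffmin[i+1] < suffmin[i] else suffmin[i])
def suffScan : List Int → List Int
  | [] => []
  | x :: rest =>
    match suffScan rest with
    | [] => [x]
    | y :: ys => (if y < x then y else x) :: y :: ys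

-- forward loop writing premax[i] = (premax[i-1] if premax[i-1] > premax[i] else premax[i])
def preScan : Int → List Int → List Int
  | _, [] => []
  | acc, x :: rest =>
    let m := if acc > x then acc else x
    m :: preScan m rest

def preMaxList : List Int → List Int
  | [] => []
  | x :: rest => x :: preScan x rest

def check_alt (perm : List Int) : Bool :=
  !((PySem.List.pyRange 0 (perm.length : Int) 1).any fun i =>
      (decide (i = 0) || decide (PySem.List.pyGetD perm i 0 ≥ PySem.List.pyGetD (preMaxList perm) (i - 1) 0))
      && (decide (i = (perm.length : Int) - 1) || decide (PySem.List.pyGetD perm i 0 ≤ PySem.List.pyGetD (suffScan perm) (i + 1) 0)))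

-- ===== PRECONDITION & SPEC =====
-- Pre_ excludes exactly one-element lists, on which A raises ValueError (min() of the empty slice perm[1:]).
def Pre_check (perm : List Int) : Prop := perm.length ≠ 1
instance (perm : List Int) : Decidable (Pre_check perm) := by unfold Pre_check; infer_instance
def pvWitness_check : List Int := [1, 2]

def Spec_check (perm : List Int) (out : Bool) : Prop := out = check_alt perm
instance (perm : List Int) (out : Bool) : Decidable (Spec_check perm out) := by unfold Spec_check; infer_instance

-- ===== CLAIM (what is proved, stated in full; the proofs are below) =====
def Claim_equal_check : Prop := ∀ (perm : List Int), Dom_check perm → Pre_check perm → Spec_check perm (check perm)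

-- ===== LEMMAS AND PROOFS =====

theorem suffScan_length (l : List Int) : (suffScan l).length = l.length := by
  induction l with
  | nil => rfl
  | cons x rest ih =>
    simp only [suffScan]
    cases h : suffScan rest with
    | nil =>
      rw [h] at ih
      simp only [List.length_nil] at ih
      simp only [List.length_cons, List.length_nil]
      omega
    | cons y ys =>
      rw [h] at ih
      simp only [List.length_cons] at ih ⊢
      omega

theorem foldl_min_pull (rs : List Int) (a b : Int) :
    min a (rs.foldl min b) = rs.foldl min (min a b) := by
  induction rs generalizing b with
  | nil => rfl
  | cons c cs ih => simp only [List.foldl_cons, ih, min_assoc]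

theorem suffScan_get? (l : List Int) (k : Nat) :
    (suffScan l)[k]? = PySem.List.min? (l.drop k) (fun y => y) := by
  induction l generalizing k with
  | nil => simp [suffScan, PySem.List.min?]
  | cons x rest ih =>
    cases k with
    | zero =>
      simp only [suffScan, List.drop_zero]
      cases h : suffScan rest with
      | nil =>
        have : rest = [] := by
          have := suffScan_length rest; rw [h] at this; simpa using this.symm
        subst this; simp [PySem.List.min?_id_cons]
      | cons y ys =>
        have h0 : (suffScan rest)[0]? = PySem.List.min? rest (fun y => y) := ih 0
        rw [h] at h0
        cases rest with
        | nil => simp [suffScan] at h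
        | cons r1 rs =>
          rw [PySem.List.min?_id_cons] at h0
          simp only [List.getElem?_cons_zero] at h0 ⊢
          have hy : y = rs.foldl min r1 := by simpa using h0
          rw [PySem.List.min?_id_cons]
          simp only [List.foldl_cons]
          have : (if y < x then y else x) = min x y := by
            by_cases hlt : y < x
            · rw [if_pos hlt, min_eq_right (le_of_lt hlt)]
            · rw [if_neg hlt, min_eq_left (by omega)]
          rw [this, hy, foldl_min_pull]
    | succ k' =>
      simp only [suffScan, List.drop_succ_cons]
      cases h : suffScan rest with
      | nil =>
        have : rest = [] := by
          have := suffScan_length rest; rw [h] at this; simpa using this.symm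
        subst this; simp [PySem.List.min?]
      | cons y ys =>
        have := ih k'
        rw [h] at this
        simpa using this

theorem preScan_get? (rest : List Int) (acc : Int) (k : Nat) (hk : k < rest.length) :
    (preScan acc rest)[k]? = some ((rest.take (k + 1)).foldl max acc) := by
  induction rest generalizing acc k with
  | nil => simp at hk
  | cons x rs ih =>
    cases k with
    | zero =>
      simp only [preScan, List.getElem?_cons_zero, List.take_succ_cons, List.take_zero,
        List.foldl_cons, List.foldl_nil]
      congr 1
      by_cases hlt : acc > x
      · rw [if_pos hlt, max_eq_left (le_of_lt hlt)]
      · rw [if_neg hlt, max_eq_right (by omega)]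
    | succ k' =>
      simp only [preScan, List.getElem?_cons_succ, List.take_succ_cons, List.foldl_cons]
      have hk' : k' < rs.length := by simpa using hk
      rw [ih _ k' hk']
      congr 2
      by_cases hlt : acc > x
      · rw [if_pos hlt, max_eq_left (le_of_lt hlt)]
      · rw [if_neg hlt, max_eq_right (by omega)]

-- A's prefix maximum equals B's premax entry: for 1 ≤ k ≤ n,
-- (max? (perm.take k)).getD 0 = premax[k-1]
theorem preMax_take (perm : List Int) (k : Nat) (hk1 : 1 ≤ k) (hk : k ≤ perm.length) :
    (preMaxList perm)[k - 1]? = PySem.List.max? (perm.take k) (fun y => y) := by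
  cases perm with
  | nil => simp at hk; omega
  | cons x rest =>
    cases k with
    | zero => omega
    | succ k' =>
      simp only [preMaxList, List.take_succ_cons, PySem.List.max?_id_cons, Nat.add_sub_cancel]
      cases k' with
      | zero => simp
      | succ j =>
        simp only [List.getElem?_cons_succ]
        have hj : j < rest.length := by simp at hk; omega
        rw [preScan_get? rest x j hj]

-- pointwise-equal predicates give equal any
theorem any_congr_mem {α : Type} (l : List α) (p q : α → Bool) (h : ∀ a ∈ l, p a = q a) :
    l.any p = l.any q := by
  induction l with
  | nil => rfl
  | cons x xs ih =>
    simp only [List.any_cons, h x (List.mem_cons_self ..),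
      ih (fun a ha => h a (List.mem_cons_of_mem _ ha))]

-- generic flag-fold: A's 'flag = False when the branch condition fires' loop computes !any
theorem foldl_flag3 (l : List Int) (C1 : Int → Prop) [DecidablePred C1] (C2 : Int → Prop)
    [DecidablePred C2] (C3 : Int → Prop) [DecidablePred C3] (P1 : Int → Prop) [DecidablePred P1]
    (P2 : Int → Prop) [DecidablePred P2] (P3 : Int → Prop) [DecidablePred P3] (b : Bool) :
    l.foldl (fun flag i =>
      if C1 i then (if P1 i then false else flag)
      else if C2 i then (if P2 i then false else flag)
      else if C3 i then (if P3 i then false else flag)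
      else flag) b
    = (b && !l.any (fun i =>
        if C1 i then decide (P1 i)
        else if C2 i then decide (P2 i)
        else if C3 i then decide (P3 i)
        else false)) := by
  induction l generalizing b with
  | nil => simp
  | cons x xs ih =>
    simp only [List.foldl_cons, List.any_cons, ih]
    by_cases h1 : C1 x <;> by_cases h2 : C2 x <;> by_cases h3 : C3 x <;>
      by_cases hp1 : P1 x <;> by_cases hp2 : P2 x <;> by_cases hp3 : P3 x <;>
      simp [h1, h2, h3, hp1, hp2, hp3]

-- A's min(perm[i+1:]) equals B's suffmin[i+1]
theorem suffix_bridge (perm : List Int) (k : Nat) :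
    (PySem.List.min? (PySem.List.slice perm (some ((k : Int) + 1)) none) (fun y => y)).getD 0
      = PySem.List.pyGetD (suffScan perm) ((k : Int) + 1) 0 := by
  rw [show (k : Int) + 1 = (((k + 1 : Nat)) : Int) from by push_cast; ring,
    PySem.List.slice_from_natCast, PySem.List.pyGetD_natCast,
    List.getD_eq_getElem?_getD, suffScan_get?]

-- A's max(perm[:i]) equals B's premax[i-1]
theorem prefix_bridge (perm : List Int) (k : Nat) (h1 : 1 ≤ k) (h2 : k ≤ perm.length) :
    (PySem.List.max? (PySem.List.slice perm none (some (k : Int))) (fun y => y)).getD 0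
      = PySem.List.pyGetD (preMaxList perm) ((k : Int) - 1) 0 := by
  rw [PySem.List.slice_to_natCast,
    show (k : Int) - 1 = (((k - 1 : Nat)) : Int) from by omega,
    PySem.List.pyGetD_natCast, List.getD_eq_getElem?_getD, preMax_take perm k h1 h2]

theorem check_spec' (perm : List Int) (hpre : perm.length ≠ 1) :
    check perm = check_alt perm := by
  unfold check check_alt
  rw [foldl_flag3]
  simp only [Bool.true_and]
  refine congrArg (fun b : Bool => !b) (any_congr_mem _ _ _ ?_)
  intro i hi
  rw [PySem.List.mem_pyRange_one] at hi
  obtain ⟨h0, hn⟩ := hi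
  obtain ⟨k, rfl⟩ : ∃ k : Nat, i = (k : Int) := ⟨i.toNat, (Int.toNat_of_nonneg h0).symm⟩
  have hk : k < perm.length := by exact_mod_cast hn
  have hlen2 : 2 ≤ perm.length := by omega
  by_cases hk0 : k = 0
  · subst hk0
    simp only [Nat.cast_zero]
    have hC1 : ¬(0 < (0 : Int) ∧ (0 : Int) < (perm.length : Int) - 1) := by omega
    have hne : (0 : Int) ≠ (perm.length : Int) - 1 := by omega
    rw [if_neg hC1]
    simp only [if_true, decide_true, Bool.true_or, Bool.true_and]
    rw [decide_eq_false hne]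
    simp only [Bool.false_or]
    have hb := suffix_bridge perm 0
    push_cast at hb
    simp only [zero_add]
    rw [hb]
  · by_cases hklast : k = perm.length - 1
    · have hC1 : ¬(0 < (k : Int) ∧ (k : Int) < (perm.length : Int) - 1) := by omega
      have hne0 : ((k : Int)) ≠ 0 := by omega
      have heq : ((k : Int)) = (perm.length : Int) - 1 := by omega
      rw [if_neg hC1, if_neg hne0, if_pos heq, decide_eq_false hne0, decide_eq_true heq]
      simp only [Bool.false_or, Bool.true_or, Bool.and_true]
      rw [prefix_bridge perm k (by omega) (by omega)]
    · have hmid : (0 < (k : Int) ∧ (k : Int) < (perm.length : Int) - 1) := by omega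
      have hne0 : ((k : Int)) ≠ 0 := by omega
      have hnelast : ((k : Int)) ≠ (perm.length : Int) - 1 := by omega
      rw [if_pos hmid, Bool.decide_and, decide_eq_false hne0, decide_eq_false hnelast]
      simp only [Bool.false_or]
      rw [prefix_bridge perm k (by omega) (by omega), suffix_bridge perm k]

-- ===== VERDICT (by name: the statement is the Claim_ definition above) =====
theorem check_spec : Claim_equal_check := by
  intro perm _ hpre
  unfold Spec_check
  exact check_spec' perm hpre
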